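-- pv_equiv track=rewrite | github.com/azariab/VoiceRecorder | tools/lvgl_icon_generator/generator_simple.py | convert_to_rgba
-- ===== SOURCE A (Python) =====
-- def convert_to_rgba(pixel_data, format_type):
--     """Convert pixel data to RGBA tuples based on input format"""
--     rgba_data = []
--
--     if format_type == "RGBA_8888":
--         # R8G8B8A8
--         for i in range(0, len(pixel_data), 4):
--             rgba_data.append((pixel_data[i], pixel_data[i+1], pixel_data[i+2], pixel_data[i+3]))
--
--     elif format_type == "RGB_888":
--         # R8G8B8 (add full alpha)
--         for i in range(0, len(pixel_data), 3):
--             rgba_data.append((pixel_data[i], pixel_data[i+1], pixel_data[i+2], 0xFF))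
--
--     elif format_type == "RGB565_ALPHA":
--         # R5G6B5A8 (little endian RGB565 + alpha)
--         for i in range(0, len(pixel_data), 3):
--             rgb565 = pixel_data[i] | (pixel_data[i+1] << 8)
--             alpha = pixel_data[i+2]
--
--             # Extract RGB565 components
--             r = ((rgb565 >> 11) & 0x1F) << 3
--             g = ((rgb565 >> 5) & 0x3F) << 2
--             b = (rgb565 & 0x1F) << 3
--
--             rgba_data.append((r, g, b, alpha))
--
--     elif format_type == "RGB565_SWAP_ALPHA":
--         # B5G6R5A8 (swapped RGB565 + alpha)
--         for i in range(0, len(pixel_data), 3):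
--             rgb565 = pixel_data[i] | (pixel_data[i+1] << 8)
--             alpha = pixel_data[i+2]
--
--             # Extract swapped RGB565 components (BGR order)
--             b = ((rgb565 >> 11) & 0x1F) << 3
--             g = ((rgb565 >> 5) & 0x3F) << 2
--             r = (rgb565 & 0x1F) << 3
--
--             rgba_data.append((r, g, b, alpha))
--
--     return rgba_data
-- ===== SOURCE B (Python) =====
-- def convert_to_rgba(pixel_data, format_type):
--     """Convert pixel data to RGBA tuples based on input format"""
--     it = iter(pixel_data)
--     if format_type == "RGBA_8888":
--         return list(zip(it, it, it, it))
--     if format_type == "RGB_888":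
--         return [(r, g, b, 0xFF) for r, g, b in zip(it, it, it)]
--     if format_type in ("RGB565_ALPHA", "RGB565_SWAP_ALPHA"):
--         swap = format_type == "RGB565_SWAP_ALPHA"
--         out = []
--         for lo, hi, alpha in zip(it, it, it):
--             v = lo | hi << 8
--             r = ((v >> 11) & 0x1F) << 3
--             g = ((v >> 5) & 0x3F) << 2
--             b = (v & 0x1F) << 3
--             out.append((b, g, r, alpha) if swap else (r, g, b, alpha))
--         return out
--     return []
-- ===== Notes on version B (the rewrite author's own statement) =====
-- stated objective: idiomatic
-- what changed: Instead of four strided index loops over range(0,len,stride) with explicit pixel_data[i+k] subscripts, B never indexes at all: it chunks the byte stream by zipping one shared iterator with itself (zip(it,it,it,it) / zip(it,it,it)) and then decodes each chunk tuple, with the two RGB565 variants unified by a swap flag.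
import Mathlib
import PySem

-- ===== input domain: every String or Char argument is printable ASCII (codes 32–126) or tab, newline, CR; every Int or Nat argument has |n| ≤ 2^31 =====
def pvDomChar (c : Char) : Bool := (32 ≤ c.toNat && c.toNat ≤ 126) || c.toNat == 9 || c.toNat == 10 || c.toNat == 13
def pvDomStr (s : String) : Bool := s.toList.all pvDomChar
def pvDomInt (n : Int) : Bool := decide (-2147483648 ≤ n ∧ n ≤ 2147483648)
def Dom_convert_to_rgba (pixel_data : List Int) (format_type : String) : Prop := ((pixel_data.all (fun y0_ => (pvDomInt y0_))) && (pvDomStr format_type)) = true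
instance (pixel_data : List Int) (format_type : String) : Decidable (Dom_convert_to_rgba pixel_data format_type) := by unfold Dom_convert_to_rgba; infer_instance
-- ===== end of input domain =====

-- B replaces A's four strided index loops by a staged pipeline: chunk the stream into
-- pixel tuples by structural recursion (Python: zip of one shared iterator), then decode
-- each chunk (idiomatic decomposition, same cost); Pre_ excludes only inputs where A
-- raises IndexError (truncated final pixel).

-- ===== PORT A =====
-- Literal transliteration of A: each branch is its own strided index loop appending tuples.
def convert_to_rgba (pixel_data : List Int) (format_type : String) : List (Int × Int × Int × Int) :=
  if format_type == "RGBA_8888" then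
    (PySem.List.pyRange 0 (pixel_data.length : Int) 4).foldl (fun acc i =>
      acc ++ [(PySem.List.pyGetD pixel_data i 0, PySem.List.pyGetD pixel_data (i+1) 0,
               PySem.List.pyGetD pixel_data (i+2) 0, PySem.List.pyGetD pixel_data (i+3) 0)]) []
  else if format_type == "RGB_888" then
    (PySem.List.pyRange 0 (pixel_data.length : Int) 3).foldl (fun acc i =>
      acc ++ [(PySem.List.pyGetD pixel_data i 0, PySem.List.pyGetD pixel_data (i+1) 0,
               PySem.List.pyGetD pixel_data (i+2) 0, (0xFF : Int))]) []
  else if format_type == "RGB565_ALPHA" then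
    (PySem.List.pyRange 0 (pixel_data.length : Int) 3).foldl (fun acc i =>
      let rgb565 := PySem.Int.bor (PySem.List.pyGetD pixel_data i 0)
                      ((PySem.List.pyGetD pixel_data (i+1) 0) <<< (8 : Nat))
      let alpha := PySem.List.pyGetD pixel_data (i+2) 0
      let r := (PySem.Int.band (rgb565 >>> (11 : Nat)) 0x1F) <<< (3 : Nat)
      let g := (PySem.Int.band (rgb565 >>> (5 : Nat)) 0x3F) <<< (2 : Nat)
      let b := (PySem.Int.band rgb565 0x1F) <<< (3 : Nat)
      acc ++ [(r, g, b, alpha)]) []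
  else if format_type == "RGB565_SWAP_ALPHA" then
    (PySem.List.pyRange 0 (pixel_data.length : Int) 3).foldl (fun acc i =>
      let rgb565 := PySem.Int.bor (PySem.List.pyGetD pixel_data i 0)
                      ((PySem.List.pyGetD pixel_data (i+1) 0) <<< (8 : Nat))
      let alpha := PySem.List.pyGetD pixel_data (i+2) 0
      let b := (PySem.Int.band (rgb565 >>> (11 : Nat)) 0x1F) <<< (3 : Nat)
      let g := (PySem.Int.band (rgb565 >>> (5 : Nat)) 0x3F) <<< (2 : Nat)
      let r := (PySem.Int.band rgb565 0x1F) <<< (3 : Nat)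
      acc ++ [(r, g, b, alpha)]) []
  else []

-- ===== PORT B =====
-- Chunkers: B's zip(it,it,it,it) / zip(it,it,it) — consume the list four/three at a
-- time, dropping an incomplete final chunk, exactly as Python's zip of one iterator.
def pvChunk4 : List Int → List (Int × Int × Int × Int)
  | a :: b :: c :: d :: rest => (a, b, c, d) :: pvChunk4 rest
  | _ => []

def pvChunk3 : List Int → List (Int × Int × Int)
  | a :: b :: c :: rest => (a, b, c) :: pvChunk3 rest
  | _ => []

-- B's RGB565 chunk decoder; `swap` unifies the two variants.
def pvDecode565 (swap : Bool) : Int × Int × Int → Int × Int × Int × Int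
  | (lo, hi, alpha) =>
    let v := PySem.Int.bor lo (hi <<< (8 : Nat))
    let r := (PySem.Int.band (v >>> (11 : Nat)) 0x1F) <<< (3 : Nat)
    let g := (PySem.Int.band (v >>> (5 : Nat)) 0x3F) <<< (2 : Nat)
    let b := (PySem.Int.band v 0x1F) <<< (3 : Nat)
    if swap then (b, g, r, alpha) else (r, g, b, alpha)

def convert_to_rgba_alt (pixel_data : List Int) (format_type : String) : List (Int × Int × Int × Int) :=
  if format_type == "RGBA_8888" then
    pvChunk4 pixel_data
  else if format_type == "RGB_888" then
    (pvChunk3 pixel_data).map (fun t => (t.1, t.2.1, t.2.2, (0xFF : Int)))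
  else if format_type == "RGB565_ALPHA" || format_type == "RGB565_SWAP_ALPHA" then
    (pvChunk3 pixel_data).map (pvDecode565 (format_type == "RGB565_SWAP_ALPHA"))
  else []

-- ===== PRECONDITION & SPEC =====
-- Pre_ excludes exactly the inputs on which Python A raises IndexError: a recognised
-- format whose stride does not divide the data length (truncated final pixel).
def Pre_convert_to_rgba (pixel_data : List Int) (format_type : String) : Prop :=
  (format_type = "RGBA_8888" → pixel_data.length % 4 = 0) ∧
  ((format_type = "RGB_888" ∨ format_type = "RGB565_ALPHA" ∨ format_type = "RGB565_SWAP_ALPHA") →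
    pixel_data.length % 3 = 0)
instance (pixel_data : List Int) (format_type : String) : Decidable (Pre_convert_to_rgba pixel_data format_type) := by unfold Pre_convert_to_rgba; infer_instance

def pvWitness_convert_to_rgba : List Int × String := ([10, 20, 30, 40], "RGBA_8888")

def Spec_convert_to_rgba (pixel_data : List Int) (format_type : String) (out : List (Int × Int × Int × Int)) : Prop := out = convert_to_rgba_alt pixel_data format_type
instance (pixel_data : List Int) (format_type : String) (out : List (Int × Int × Int × Int)) : Decidable (Spec_convert_to_rgba pixel_data format_type out) := by unfold Spec_convert_to_rgba; infer_instance

-- ===== CLAIM (what is proved, stated in full; the proofs are below) =====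
def Claim_equal_convert_to_rgba : Prop := ∀ (pixel_data : List Int) (format_type : String), Dom_convert_to_rgba pixel_data format_type → Pre_convert_to_rgba pixel_data format_type → Spec_convert_to_rgba pixel_data format_type (convert_to_rgba pixel_data format_type)

-- ===== LEMMAS AND PROOFS =====

-- A strided range over a divisible length, written as a Nat range of chunk indices.
theorem pv_pyRange_stride (n s : Nat) (sI : Int) (hsI : sI = (s : Int)) (hs : 0 < s)
    (h : n % s = 0) :
    PySem.List.pyRange 0 (n : Int) sI =
      (List.range (n / s)).map (fun k => ((s * k : Nat) : Int)) := by
  subst hsI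
  rw [PySem.List.pyRange_of_pos 0 (n : Int) (by exact_mod_cast hs)]
  rcases Nat.eq_zero_or_pos n with h0 | h0
  · simp [h0]
  · have hb : (0 : Int) < (n : Int) := by exact_mod_cast h0
    rw [if_pos hb]
    have e1 : ((n : Int) - 0 + (s : Int) - 1) = ((n + s - 1 : Nat) : Int) := by omega
    rw [e1, ← Int.natCast_ediv, Int.toNat_natCast]
    obtain ⟨q, rfl⟩ := Nat.dvd_of_mod_eq_zero h
    have hcount : (s * q + s - 1) / s = s * q / s := by
      rw [Nat.mul_div_cancel_left q hs]
      refine Nat.div_eq_of_lt_le (by rw [Nat.mul_comm]; omega) ?_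
      rw [Nat.succ_mul, Nat.mul_comm]; omega
    rw [hcount]
    apply List.map_congr_left
    intro k _
    push_cast; ring

-- Index shifting through a 4-element prefix.
theorem pv_getD_shift4 (a b c d : Int) (rest : List Int) (m : Nat) (x : Int) :
    (a :: b :: c :: d :: rest).getD (m + 4) x = rest.getD m x := rfl

theorem pv_getD_shift3 (a b c : Int) (rest : List Int) (m : Nat) (x : Int) :
    (a :: b :: c :: rest).getD (m + 3) x = rest.getD m x := rfl

-- Chunk characterisation: a 4-strided index map over a divisible-length list IS pvChunk4.
theorem pv_chunk4_eq : ∀ (l : List Int), l.length % 4 = 0 →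
    (List.range (l.length / 4)).map (fun k =>
      (l.getD (4 * k) 0, l.getD (4 * k + 1) 0, l.getD (4 * k + 2) 0, l.getD (4 * k + 3) 0)) =
    pvChunk4 l
  | [], _ => by simp [pvChunk4]
  | [a], h => by simp at h
  | [a, b], h => by simp at h
  | [a, b, c], h => by simp at h
  | a :: b :: c :: d :: rest, h => by
    have hr : rest.length % 4 = 0 := by simp at h; omega
    have hl : (a :: b :: c :: d :: rest).length / 4 = rest.length / 4 + 1 := by
      simp; omega
    rw [hl, List.range_succ_eq_map, List.map_cons, List.map_map, pvChunk4]
    refine congrArg₂ _ (by simp) ?_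
    rw [← pv_chunk4_eq rest hr]
    apply List.map_congr_left
    intro k _
    have e0 : 4 * (k + 1) = 4 * k + 4 := by ring
    simp only [Function.comp, Nat.succ_eq_add_one, e0, pv_getD_shift4]

-- Chunk characterisation for stride 3, generic in the per-chunk decoder g.
theorem pv_chunk3_eq {α : Type} (g : Int × Int × Int → α) : ∀ (l : List Int), l.length % 3 = 0 →
    (List.range (l.length / 3)).map (fun k =>
      g (l.getD (3 * k) 0, l.getD (3 * k + 1) 0, l.getD (3 * k + 2) 0)) =
    (pvChunk3 l).map g
  | [], _ => by simp [pvChunk3]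
  | [a], h => by simp at h
  | [a, b], h => by simp at h
  | a :: b :: c :: rest, h => by
    have hr : rest.length % 3 = 0 := by simp at h; omega
    have hl : (a :: b :: c :: rest).length / 3 = rest.length / 3 + 1 := by simp; omega
    rw [hl, List.range_succ_eq_map, List.map_cons, List.map_map, pvChunk3, List.map_cons]
    refine congrArg₂ _ (by simp) ?_
    rw [← pv_chunk3_eq g rest hr]
    apply List.map_congr_left
    intro k _
    have e0 : 3 * (k + 1) = 3 * k + 3 := by ring
    simp only [Function.comp, Nat.succ_eq_add_one, e0, pv_getD_shift3]

-- ===== VERDICT (by name: the statement is the Claim_ definition above) =====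
theorem convert_to_rgba_spec : Claim_equal_convert_to_rgba := by
  intro l fmt _ hpre
  unfold Spec_convert_to_rgba convert_to_rgba convert_to_rgba_alt
  obtain ⟨h4, h3⟩ := hpre
  by_cases h1 : fmt = "RGBA_8888"
  · have hd := h4 h1
    subst h1
    simp only [show ("RGBA_8888" == "RGBA_8888") = true by decide, if_true]
    rw [PySem.List.foldl_append_singleton_eq_map,
        pv_pyRange_stride l.length 4 4 (by norm_num) (by omega) hd,
        List.map_map, List.nil_append, ← pv_chunk4_eq l hd]
    apply List.map_congr_left
    intro k _
    simp only [Function.comp]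
    rw [show ((4 * k : Nat) : Int) + 1 = ((4 * k + 1 : Nat) : Int) by push_cast; ring,
        show ((4 * k : Nat) : Int) + 2 = ((4 * k + 2 : Nat) : Int) by push_cast; ring,
        show ((4 * k : Nat) : Int) + 3 = ((4 * k + 3 : Nat) : Int) by push_cast; ring]
    simp only [PySem.List.pyGetD_natCast, List.getD_eq_getElem?_getD]
  · by_cases h2 : fmt = "RGB_888"
    · have hd := h3 (Or.inl h2)
      subst h2
      simp only [show ("RGB_888" == "RGBA_8888") = false by decide,
        show ("RGB_888" == "RGB_888") = true by decide, Bool.false_eq_true, if_true, if_false]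
      rw [PySem.List.foldl_append_singleton_eq_map,
          pv_pyRange_stride l.length 3 3 (by norm_num) (by omega) hd,
          List.map_map, List.nil_append,
          ← pv_chunk3_eq (fun t => (t.1, t.2.1, t.2.2, (0xFF : Int))) l hd]
      apply List.map_congr_left
      intro k _
      simp only [Function.comp]
      rw [show ((3 * k : Nat) : Int) + 1 = ((3 * k + 1 : Nat) : Int) by push_cast; ring,
          show ((3 * k : Nat) : Int) + 2 = ((3 * k + 2 : Nat) : Int) by push_cast; ring]
      simp only [PySem.List.pyGetD_natCast, List.getD_eq_getElem?_getD]
    · by_cases ha : fmt = "RGB565_ALPHA"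
      · have hd := h3 (Or.inr (Or.inl ha))
        subst ha
        simp only [show ("RGB565_ALPHA" == "RGBA_8888") = false by decide,
          show ("RGB565_ALPHA" == "RGB_888") = false by decide,
          show ("RGB565_ALPHA" == "RGB565_ALPHA") = true by decide,
          show ("RGB565_ALPHA" == "RGB565_SWAP_ALPHA") = false by decide,
          Bool.true_or, Bool.false_eq_true, if_true, if_false]
        rw [PySem.List.foldl_append_singleton_eq_map,
            pv_pyRange_stride l.length 3 3 (by norm_num) (by omega) hd,
            List.map_map, List.nil_append,
            ← pv_chunk3_eq (pvDecode565 false) l hd]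
        apply List.map_congr_left
        intro k _
        simp only [Function.comp, pvDecode565]
        rw [show ((3 * k : Nat) : Int) + 1 = ((3 * k + 1 : Nat) : Int) by push_cast; ring,
            show ((3 * k : Nat) : Int) + 2 = ((3 * k + 2 : Nat) : Int) by push_cast; ring]
        simp only [PySem.List.pyGetD_natCast, List.getD_eq_getElem?_getD, Bool.false_eq_true, if_false]
      · by_cases hb : fmt = "RGB565_SWAP_ALPHA"
        · have hd := h3 (Or.inr (Or.inr hb))
          subst hb
          simp only [show ("RGB565_SWAP_ALPHA" == "RGBA_8888") = false by decide,
            show ("RGB565_SWAP_ALPHA" == "RGB_888") = false by decide,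
            show ("RGB565_SWAP_ALPHA" == "RGB565_ALPHA") = false by decide,
            show ("RGB565_SWAP_ALPHA" == "RGB565_SWAP_ALPHA") = true by decide,
            Bool.false_or, Bool.false_eq_true, if_true, if_false]
          rw [PySem.List.foldl_append_singleton_eq_map,
              pv_pyRange_stride l.length 3 3 (by norm_num) (by omega) hd,
              List.map_map, List.nil_append,
              ← pv_chunk3_eq (pvDecode565 true) l hd]
          apply List.map_congr_left
          intro k _
          simp only [Function.comp, pvDecode565]
          rw [show ((3 * k : Nat) : Int) + 1 = ((3 * k + 1 : Nat) : Int) by push_cast; ring,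
              show ((3 * k : Nat) : Int) + 2 = ((3 * k + 2 : Nat) : Int) by push_cast; ring]
          simp only [PySem.List.pyGetD_natCast, List.getD_eq_getElem?_getD, if_true]
        · have e1 : (fmt == "RGBA_8888") = false := by simp [h1]
          have e2 : (fmt == "RGB_888") = false := by simp [h2]
          have e3 : (fmt == "RGB565_ALPHA") = false := by simp [ha]
          have e4 : (fmt == "RGB565_SWAP_ALPHA") = false := by simp [hb]
          simp [e1, e2, e3, e4]
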